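-- pv_equiv track=rewrite | github.com/devjefersonsantos/restaurant-management-system | utils/number_of_items.py | number_of_items
-- ===== SOURCE A (Python) =====
-- def number_of_items(items: list[int] | tuple[int]) -> dict:
--     if type(items) is list:
--         items = items.copy()
--     else:
--         items = list(items)
--
--     items.sort()
--     result = dict()
--
--     for item in items:
--         if item in result:
--             result[item] += 1
--         else:
--             result[item] = 1
--     return result
-- ===== SOURCE B (Python) =====
-- def number_of_items(items):
--     xs = sorted(items)
--     result = {}
--     i, n = 0, len(xs)
--     while i < n:
--         j = i + 1
--         while j < n and xs[j] == xs[i]: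
--             j += 1
--         result[xs[i]] = j - i
--         i = j
--     return result
-- ===== Notes on version B (the rewrite author's own statement) =====
-- stated objective: alternative
-- what changed: B run-length encodes the sorted list with a two-pointer scan (each key written once with its run length), instead of A's per-element dict accumulation with a membership test and increment.
import Mathlib
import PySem

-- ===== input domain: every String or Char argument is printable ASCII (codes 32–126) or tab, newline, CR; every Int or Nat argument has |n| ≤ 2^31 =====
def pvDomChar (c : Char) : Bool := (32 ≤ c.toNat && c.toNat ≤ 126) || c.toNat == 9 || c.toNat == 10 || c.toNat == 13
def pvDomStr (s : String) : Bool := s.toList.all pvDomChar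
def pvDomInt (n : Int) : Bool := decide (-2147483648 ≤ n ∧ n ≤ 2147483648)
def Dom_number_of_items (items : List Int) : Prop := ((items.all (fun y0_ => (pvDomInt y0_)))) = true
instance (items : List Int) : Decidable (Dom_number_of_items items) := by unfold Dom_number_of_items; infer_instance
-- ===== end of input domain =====

-- B run-length encodes the sorted list with a two-pointer scan (each key written once per run), instead of A's per-element dict accumulation.


-- ===== PORT A =====
-- items.sort(); then count into a dict by membership test; return the dict (items in insertion order)
def number_of_items (items : List Int) : List (Int × Int) :=
  let sortedItems := PySem.List.sorted items id
  let result := sortedItems.foldl (fun d item =>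
      if d.contains item then d.modify item 0 (fun v => v + 1)
      else d.insert item 1) PySem.Dict.empty
  result.items

-- ===== PORT B =====
-- outer while: one run per iteration; inner while (the j-scan) is the takeWhile,
-- the advance 'i = j' is the dropWhile; result[xs[i]] = j - i appends (run head, run length)
def pvRunCount : List Int → List (Int × Int)
  | [] => []
  | x :: xs =>
      (x, (1 + ((xs.takeWhile (fun y => y == x)).length : Int)))
        :: pvRunCount (xs.dropWhile (fun y => y == x))
termination_by l => l.length
decreasing_by exact Nat.lt_succ_of_le (List.dropWhile_sublist _).length_le

def number_of_items_alt (items : List Int) : List (Int × Int) :=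
  pvRunCount (PySem.List.sorted items id)

-- ===== PRECONDITION & SPEC =====
def Spec_number_of_items (items : List Int) (out : List (Int × Int)) : Prop := out = number_of_items_alt items
instance (items : List Int) (out : List (Int × Int)) : Decidable (Spec_number_of_items items out) := by unfold Spec_number_of_items; infer_instance

-- ===== CLAIM (what is proved, stated in full; the proofs are below) =====
def Claim_equal_number_of_items : Prop := ∀ (items : List Int), Dom_number_of_items items → Spec_number_of_items items (number_of_items items)

-- ===== LEMMAS AND PROOFS =====

-- A's loop body equals the canonical counter step for every dict
theorem step_eq :
    (fun (d : PySem.Dict Int Int) item =>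
      if d.contains item then d.modify item 0 (fun v => v + 1)
      else d.insert item 1)
    = (fun (d : PySem.Dict Int Int) x => d.modify x 0 (fun v => v + 1)) := by
  funext d x
  by_cases h : d.contains x
  · simp [h]
  · have h' : d.contains x = false := by simpa using h
    rw [PySem.Dict.modify]
    simp [h', PySem.Dict.getD_of_not_contains d (0:Int) h']

-- x does not survive dropWhile (== x) on a sorted list all of whose elements are ≥ x
theorem not_mem_dropWhile_self (x : Int) : ∀ (xs : List Int), (∀ y ∈ xs, x ≤ y) →
    xs.Pairwise (· ≤ ·) → x ∉ xs.dropWhile (fun y => y == x)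
  | [], _, _ => by simp
  | y :: ys, hle, hp => by
    by_cases hy : (y == x) = true
    · rw [List.dropWhile_cons, if_pos hy]
      exact not_mem_dropWhile_self x ys (fun z hz => hle z (List.mem_cons_of_mem _ hz))
        hp.tail
    · rw [List.dropWhile_cons, if_neg hy]
      intro hmem
      rcases List.mem_cons.1 hmem with h | h
      · exact hy (by simp [h.symm])
      · have h1 : y ≤ x := (List.pairwise_cons.1 hp).1 x h
        have h2 : x ≤ y := hle y List.mem_cons_self
        exact hy (by simp [le_antisymm h1 h2])

-- discard removes nothing when the element is absent
theorem discard_of_not_mem {s : List Int} {x : Int} (h : x ∉ s) :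
    PySem.Set.discard s x = s := by
  rw [PySem.Set.discard]
  refine List.filter_eq_self.2 (fun y hy => ?_)
  have : y ≠ x := fun e => h (e ▸ hy)
  simp [this]

-- set(x :: run-of-x ++ rest) = x :: set(rest) when x ∉ rest
theorem ofList_run_cons (x : Int) : ∀ (t d : List Int), (∀ y ∈ t, y = x) → x ∉ d →
    PySem.Set.ofList (x :: (t ++ d)) = x :: PySem.Set.ofList d
  | [], d, _, hxd => by
    rw [List.nil_append, PySem.Set.ofList_cons,
      discard_of_not_mem (by simpa [PySem.Set.mem_ofList] using hxd)]
  | y :: t', d, ht, hxd => by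
    have hy : y = x := ht y List.mem_cons_self
    subst hy
    have ih := ofList_run_cons y t' d (fun z hz => ht z (List.mem_cons_of_mem _ hz)) hxd
    have hxd' : y ∉ (PySem.Set.ofList d : List Int) := by
      simpa [PySem.Set.mem_ofList] using hxd
    rw [List.cons_append, PySem.Set.ofList_cons, ih]
    have h2 : PySem.Set.discard (y :: (PySem.Set.ofList d : List Int)) y
        = PySem.Set.discard (PySem.Set.ofList d) y := by
      simp [PySem.Set.discard]
    rw [h2, discard_of_not_mem hxd']

-- the run-length scan of a sorted list is its counter, keyed in first-occurrence order
theorem pvRunCount_eq : ∀ (n : Nat) (xs : List Int), xs.length ≤ n → xs.Pairwise (· ≤ ·) →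
    pvRunCount xs = (PySem.Set.ofList xs : List Int).map
      (fun k => (k, (List.count k xs : Int)))
  | _, [], _, _ => by simp [pvRunCount]
  | 0, x :: xs, hn, _ => by simp at hn
  | n + 1, x :: xs, hn, hp => by
    have hle : ∀ y ∈ xs, x ≤ y := (List.pairwise_cons.1 hp).1
    have hxd : x ∉ xs.dropWhile (fun y => y == x) :=
      not_mem_dropWhile_self x xs hle hp.tail
    have ht : ∀ y ∈ xs.takeWhile (fun y => y == x), y = x :=
      fun y hy => by simpa using List.mem_takeWhile_imp hy
    have hdlen : (xs.dropWhile (fun y => y == x)).length ≤ n :=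
      le_trans (List.dropWhile_sublist _).length_le (Nat.succ_le_succ_iff.1 hn)
    have hdp : (xs.dropWhile (fun y => y == x)).Pairwise (· ≤ ·) :=
      hp.tail.sublist (List.dropWhile_sublist _)
    have ih := pvRunCount_eq n (xs.dropWhile (fun y => y == x)) hdlen hdp
    rw [pvRunCount, ih]
    set t := xs.takeWhile (fun y => y == x) with htdef
    set d := xs.dropWhile (fun y => y == x) with hddef
    have hsplit : xs = t ++ d := (List.takeWhile_append_dropWhile).symm
    rw [show (x :: xs) = x :: (t ++ d) from by rw [← hsplit]]
    rw [ofList_run_cons x t d ht hxd, List.map_cons]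
    congr 1
    · -- head: count of x is 1 + run length
      have hct : List.count x t = t.length :=
        List.count_eq_length.2 (fun b hb => (ht b hb).symm)
      have hcd : List.count x d = 0 := List.count_eq_zero.2 hxd
      simp [List.count_cons_self, List.count_append, hct, hcd]
      omega
    · -- tail: for keys of the remainder, counting the remainder suffices
      apply List.map_congr_left
      intro k hk
      have hkd : k ∈ d := by simpa [PySem.Set.mem_ofList] using hk
      have hkx : k ≠ x := fun e => hxd (e ▸ hkd)
      have hkt : List.count k t = 0 :=
        List.count_eq_zero.2 (fun hm => hkx (ht k hm))
      simp [hkx.symm, List.count_append, hkt]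

-- ===== VERDICT (by name: the statement is the Claim_ definition above) =====
theorem number_of_items_spec : Claim_equal_number_of_items := by
  intro items _
  unfold Spec_number_of_items number_of_items number_of_items_alt
  simp only []
  rw [step_eq, ← PySem.Dict.counter_eq_foldl, PySem.Dict.items_counter,
    pvRunCount_eq (PySem.List.sorted items id).length _ le_rfl
      (PySem.List.sorted_pairwise items id)]
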